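-- pv_equiv track=rewrite | github.com/DavidValenta011/MazeRun | utils.py | GetLinesByBoundaryBoxes
-- ===== SOURCE A (Python) =====
-- def BoxIntersect(arrayOfBoxes, line):
--     """
--     Determines, whether line (given by Y coordinate) intersects
--     any of the provided bounding boxes.
--
--     Parameters:
--     - arrayOfBoxes: Array of bounding boxes.
--     - line: Line Y coordinate.
--
--     Returns:
--     Boolean: Line intersects any box.
--     """
--
--     for box in arrayOfBoxes:
--         if box[0] <= line and box[2] >= line:
--             return True
--     return False
--
-- def GetLinesByBoundaryBoxes(arrayOfBoxes, imageHeight):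
--     """
--     Finds coordinates of all lines from given set of boundary boxes.
--
--     By line I mean space between two horizontal borders occupied
--     by any of the given boundary boxes.
--
--     We assume, that the lines don't intersect and there is also
--     horizontal border of size at least 1 between the lines.
--
--     Parameters:
--     - arrayOfBoxes: Array of bounding boxes.
--     - line: Pixel height of input image.
--
--     Returns:
--     List of three lists:
--         - List with line indices (I provided here for testing purposes; not necessary otherwise).
--         - List with Y coordinates of lower borders of the lines
--         - List with Y coordinates of upper borders of the lines
--     """
--     readingLine = False
--     readingLineChange = False
--
--     tmpNrOfLines = 0
--     line_indices = []
--     minimum_lines_y = []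
--     maximum_lines_y = []
--
--     for i in range(0, imageHeight):
--         if BoxIntersect(arrayOfBoxes, i):
--             if not readingLine:
--                 readingLineChange = True
--             else:
--                 readingLineChange = False
--             readingLine = True
--             if readingLineChange:
--                 line_indices.append(tmpNrOfLines)
--                 minimum_lines_y.append(i)
--                 tmpNrOfLines += 1
--         else:
--             if readingLine:
--                 readingLineChange = True
--             else:
--                 readingLineChange = False
--             readingLine = False
--             if (readingLineChange):
--                 maximum_lines_y.append(i)
--
--     return [line_indices, minimum_lines_y, maximum_lines_y]
-- ===== SOURCE B (Python) =====
-- def GetLinesByBoundaryBoxes(arrayOfBoxes, imageHeight):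
--     if imageHeight <= 0:
--         return [[], [], []]
--     # difference array over [0, imageHeight]: each box is marked once
--     diff = [0] * (imageHeight + 1)
--     for box in arrayOfBoxes:
--         lo = max(box[0], 0)
--         hi = min(box[2], imageHeight - 1)
--         if lo <= hi:
--             diff[lo] += 1
--             diff[hi + 1] -= 1
--     # one prefix-sum scan emits the run boundaries
--     c = 0
--     prev = False
--     starts = []
--     ends = []
--     i = 0
--     for dv in diff[:imageHeight]:
--         c += dv
--         cur = c > 0
--         if cur and not prev:
--             starts.append(i)
--         if prev and not cur:
--             ends.append(i)
--         prev = cur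
--         i += 1
--     return [list(range(len(starts))), starts, ends]
-- ===== Notes on version B (the rewrite author's own statement) =====
-- stated objective: faster
-- what changed: A re-scans every box for each of the imageHeight lines inside a state machine; B marks each box once in a difference array over [0, imageHeight], takes one prefix-sum pass to get per-line coverage, and emits run starts/ends with boundary-detection comprehensions.
-- outside the precondition, e.g. on GetLinesByBoundaryBoxes([[100]], 3): A returns [[], [], []], B raises IndexError
import Mathlib
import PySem

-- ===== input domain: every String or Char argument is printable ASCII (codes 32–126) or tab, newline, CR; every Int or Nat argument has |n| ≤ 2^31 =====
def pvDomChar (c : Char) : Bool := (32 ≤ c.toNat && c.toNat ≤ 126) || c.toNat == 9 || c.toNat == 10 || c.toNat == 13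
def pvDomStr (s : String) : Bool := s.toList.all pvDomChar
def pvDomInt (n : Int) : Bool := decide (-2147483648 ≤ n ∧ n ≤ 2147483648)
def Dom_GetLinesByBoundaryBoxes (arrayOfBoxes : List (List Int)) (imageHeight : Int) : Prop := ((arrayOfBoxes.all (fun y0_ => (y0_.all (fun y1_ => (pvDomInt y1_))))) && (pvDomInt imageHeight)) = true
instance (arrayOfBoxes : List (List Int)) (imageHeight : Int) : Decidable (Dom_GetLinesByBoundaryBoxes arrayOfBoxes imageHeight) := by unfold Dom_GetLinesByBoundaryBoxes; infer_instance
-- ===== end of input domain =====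

-- B replaces A's per-line scan over all boxes (difference array over [0,H] + one prefix-sum pass
-- + boundary-detection comprehensions instead of A's per-line any-box scan inside a state machine).

-- ===== PORT A =====
-- BoxIntersect: Option Bool, none = IndexError from box[0]/box[2] (Python short-circuits `and`).
def BoxIntersect (arrayOfBoxes : List (List Int)) (line : Int) : Option Bool :=
  match arrayOfBoxes with
  | [] => some false
  | box :: rest =>
    match PySem.List.pyGet? box 0 with
    | none => none
    | some b0 =>
      if b0 ≤ line then
        match PySem.List.pyGet? box 2 with
        | none => none
        | some b2 =>
          if line ≤ b2 then some true else BoxIntersect rest line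
      else BoxIntersect rest line

-- one iteration of A's for-loop; state = (readingLine, tmpNrOfLines, line_indices, minimum_lines_y, maximum_lines_y)
def AStep (arrayOfBoxes : List (List Int))
    (st : Option (Bool × Int × List Int × List Int × List Int)) (i : Int) :
    Option (Bool × Int × List Int × List Int × List Int) :=
  match st with
  | none => none
  | some (reading, cnt, idx, mins, maxs) =>
    match BoxIntersect arrayOfBoxes i with
    | none => none
    | some true =>
      if reading then some (true, cnt, idx, mins, maxs)
      else some (true, cnt + 1, idx ++ [cnt], mins ++ [i], maxs)
    | some false =>
      if reading then some (false, cnt, idx, mins, maxs ++ [i])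
      else some (false, cnt, idx, mins, maxs)

def GetLinesByBoundaryBoxes (arrayOfBoxes : List (List Int)) (imageHeight : Int) : List (List Int) :=
  match (PySem.List.pyRange 0 imageHeight 1).foldl (AStep arrayOfBoxes) (some (false, 0, [], [], [])) with
  | none => []  -- unreachable under Pre_ (IndexError in Python)
  | some (_, _, idx, mins, maxs) => [idx, mins, maxs]

-- ===== PORT B =====
-- one iteration of B's box loop: clip the box to [0, imageHeight-1] and mark it in the diff array
-- (pyGetD box 0 0 / pyGetD box 2 0 port box[0]/box[2]: exact under Pre_, where every box has ≥ 3 entries)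
def bStep (imageHeight : Int) (d : List Int) (box : List Int) : List Int :=
  let lo := max (PySem.List.pyGetD box 0 0) 0
  let hi := min (PySem.List.pyGetD box 2 0) (imageHeight - 1)
  if lo ≤ hi then
    let d1 := PySem.List.pySetD d lo (PySem.List.pyGetD d lo 0 + 1)
    PySem.List.pySetD d1 (hi + 1) (PySem.List.pyGetD d1 (hi + 1) 0 - 1)
  else d

-- one iteration of B's prefix-sum scan over dv in diff[:imageHeight]; state = (c, prev, i, starts, ends)
def scanStep (st : Int × Bool × Int × List Int × List Int) (dv : Int) : Int × Bool × Int × List Int × List Int :=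
  match st with
  | (c0, prev, i, starts, ends) =>
    let c := c0 + dv
    let cur := decide (0 < c)
    (c, cur, i + 1,
     (if cur && !prev then starts ++ [i] else starts),
     (if prev && !cur then ends ++ [i] else ends))

def GetLinesByBoundaryBoxes_alt (arrayOfBoxes : List (List Int)) (imageHeight : Int) : List (List Int) :=
  if imageHeight ≤ 0 then [[], [], []] else
  let diff := arrayOfBoxes.foldl (bStep imageHeight) (List.replicate (imageHeight.toNat + 1) 0)
  let fin := (PySem.List.slice diff none (some imageHeight)).foldl
      scanStep ((0 : Int), false, (0 : Int), ([] : List Int), ([] : List Int))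
  [PySem.List.pyRange 0 (fin.2.2.2.1.length : Int) 1, fin.2.2.2.1, fin.2.2.2.2]

-- ===== PRECONDITION & SPEC =====
-- Pre_ excludes positive-height inputs containing a box with fewer than 3 entries: there Python A
-- raises IndexError on any line the short box's first entry does not exceed, and where A happens to
-- return [[],[],[]] (box coordinates never reached) B's unconditional box[2] read raises instead.
def Pre_GetLinesByBoundaryBoxes (arrayOfBoxes : List (List Int)) (imageHeight : Int) : Prop :=
  imageHeight ≤ 0 ∨ ∀ box ∈ arrayOfBoxes, 3 ≤ box.length
instance (arrayOfBoxes : List (List Int)) (imageHeight : Int) : Decidable (Pre_GetLinesByBoundaryBoxes arrayOfBoxes imageHeight) := by unfold Pre_GetLinesByBoundaryBoxes; infer_instance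

def pvWitness_GetLinesByBoundaryBoxes : List (List Int) × Int := ([[1, 0, 2, 5], [5, 0, 6, 5]], 9)

def Spec_GetLinesByBoundaryBoxes (arrayOfBoxes : List (List Int)) (imageHeight : Int) (out : List (List Int)) : Prop := out = GetLinesByBoundaryBoxes_alt arrayOfBoxes imageHeight
instance (arrayOfBoxes : List (List Int)) (imageHeight : Int) (out : List (List Int)) : Decidable (Spec_GetLinesByBoundaryBoxes arrayOfBoxes imageHeight out) := by unfold Spec_GetLinesByBoundaryBoxes; infer_instance

-- ===== CLAIM (what is proved, stated in full; the proofs are below) =====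
def Claim_equal_GetLinesByBoundaryBoxes : Prop := ∀ (arrayOfBoxes : List (List Int)) (imageHeight : Int), Dom_GetLinesByBoundaryBoxes arrayOfBoxes imageHeight → Pre_GetLinesByBoundaryBoxes arrayOfBoxes imageHeight → Spec_GetLinesByBoundaryBoxes arrayOfBoxes imageHeight (GetLinesByBoundaryBoxes arrayOfBoxes imageHeight)

-- ===== LEMMAS AND PROOFS =====

-- the coverage predicate both programs compute
def covf (arrayOfBoxes : List (List Int)) (i : Int) : Bool :=
  arrayOfBoxes.any (fun b => decide (PySem.List.pyGetD b 0 0 ≤ i) && decide (i ≤ PySem.List.pyGetD b 2 0))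

lemma boxIntersect_eq (arrayOfBoxes : List (List Int)) (i : Int)
    (h3 : ∀ box ∈ arrayOfBoxes, 3 ≤ box.length) :
    BoxIntersect arrayOfBoxes i = some (covf arrayOfBoxes i) := by
  induction arrayOfBoxes with
  | nil => simp [BoxIntersect, covf]
  | cons box rest ih =>
    have hb : 3 ≤ box.length := h3 box (by simp)
    have ih' := ih (fun b hb' => h3 b (List.mem_cons_of_mem _ hb'))
    obtain ⟨a, b, c, tl, rfl⟩ : ∃ a b c tl, box = a :: b :: c :: tl := by
      rcases box with _ | ⟨a, _ | ⟨b, _ | ⟨c, tl⟩⟩⟩ <;> simp at hb ⊢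
    have h0 : PySem.List.pyGet? (a :: b :: c :: tl) 0 = some a := by
      simpa using PySem.List.pyGet?_ofNat (a :: b :: c :: tl) 0 (by simp)
    have h2 : PySem.List.pyGet? (a :: b :: c :: tl) 2 = some c := by
      simpa using PySem.List.pyGet?_ofNat (a :: b :: c :: tl) 2 (by simp)
    have g0 : PySem.List.pyGetD (a :: b :: c :: tl) 0 (0 : Int) = a := by
      simpa using PySem.List.pyGetD_ofNat (a :: b :: c :: tl) 0 (0 : Int) (by simp)
    have g2 : PySem.List.pyGetD (a :: b :: c :: tl) 2 (0 : Int) = c := by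
      simpa using PySem.List.pyGetD_ofNat (a :: b :: c :: tl) 2 (0 : Int) (by simp)
    by_cases hA : a ≤ i <;> by_cases hB : i ≤ c <;>
      simp [BoxIntersect, h0, h2, hA, hB, ih', covf, g0, g2]

-- A's loop with the Option layer stripped
def PStep (f : Int → Bool) (st : Bool × Int × List Int × List Int × List Int) (i : Int) :
    Bool × Int × List Int × List Int × List Int :=
  match st with
  | (reading, cnt, idx, mins, maxs) =>
    if f i then
      if reading then (true, cnt, idx, mins, maxs)
      else (true, cnt + 1, idx ++ [cnt], mins ++ [i], maxs)
    else
      if reading then (false, cnt, idx, mins, maxs ++ [i])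
      else (false, cnt, idx, mins, maxs)

lemma afold_eq_pfold (arrayOfBoxes : List (List Int)) (l : List Int)
    (h3 : ∀ box ∈ arrayOfBoxes, 3 ≤ box.length)
    (st : Bool × Int × List Int × List Int × List Int) :
    l.foldl (AStep arrayOfBoxes) (some st) = some (l.foldl (PStep (covf arrayOfBoxes)) st) := by
  induction l generalizing st with
  | nil => rfl
  | cons i l ih =>
    have hst : AStep arrayOfBoxes (some st) i = some (PStep (covf arrayOfBoxes) st i) := by
      obtain ⟨reading, cnt, idx, mins, maxs⟩ := st
      simp only [AStep, PStep, boxIntersect_eq arrayOfBoxes i h3]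
      cases h : covf arrayOfBoxes i <;> cases reading <;> simp
    simp only [List.foldl_cons, hst, ih]

def startsOf (f : Int → Bool) (m : Int) : List Int :=
  (PySem.List.pyRange 0 m 1).filter (fun i => f i && (i == 0 || !f (i - 1)))
def endsOf (f : Int → Bool) (m : Int) : List Int :=
  (PySem.List.pyRange 0 m 1).filter (fun i => !f i && decide (0 < i) && f (i - 1))

-- characterisation of A's state machine after the first m lines
lemma pfold_char (f : Int → Bool) (m : Nat) :
    (PySem.List.pyRange 0 (m : Int) 1).foldl (PStep f) (false, 0, [], [], []) =
      ((if m = 0 then false else f ((m : Int) - 1)),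
       ((startsOf f m).length : Int),
       PySem.List.pyRange 0 ((startsOf f m).length : Int) 1,
       startsOf f m, endsOf f m) := by
  induction m with
  | zero => simp [PySem.List.pyRange_one_eq_nil, startsOf, endsOf]
  | succ m ih =>
    have hcast : ((m + 1 : Nat) : Int) = (m : Int) + 1 := by push_cast; ring
    have hsplit : PySem.List.pyRange 0 ((m : Int) + 1) 1
        = PySem.List.pyRange 0 (m : Int) 1 ++ [(m : Int)] :=
      PySem.List.pyRange_one_succ_right (by positivity)
    have hlen : ∀ L : List Int, PySem.List.pyRange 0 ((L.length : Int) + 1) 1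
        = PySem.List.pyRange 0 ((L.length : Int)) 1 ++ [((L.length : Int))] :=
      fun L => PySem.List.pyRange_one_succ_right (by positivity)
    set pc : Bool := (if m = 0 then false else f ((m : Int) - 1)) with hpcdef
    have hX : (((m : Int) == 0) || !f ((m : Int) - 1)) = !pc := by
      by_cases hm : m = 0
      · subst hm; simp [hpcdef]
      · have h0 : ((m : Int) == 0) = false := by simp; omega
        simp [hpcdef, hm, h0]
    have hY : ((!f (m : Int) && decide (0 < (m : Int))) && f ((m : Int) - 1)) = (!f (m : Int) && pc) := by
      by_cases hm : m = 0
      · subst hm; simp [hpcdef]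
      · have h1 : decide ((0 : Int) < (m : Int)) = true := decide_eq_true (by omega)
        rw [hpcdef, if_neg hm, h1, Bool.and_true]
    have hs : startsOf f ((m : Int) + 1)
        = startsOf f (m : Int) ++ (if f (m : Int) && !pc then [(m : Int)] else []) := by
      simp only [startsOf, hsplit, List.filter_append, List.filter_singleton, Bool.cond_eq_ite]
      rw [hX]
    have he : endsOf f ((m : Int) + 1)
        = endsOf f (m : Int) ++ (if !f (m : Int) && pc then [(m : Int)] else []) := by
      simp only [endsOf, hsplit, List.filter_append, List.filter_singleton, Bool.cond_eq_ite]
      rw [hY]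
    have hfirst : (if m + 1 = 0 then false else f ((m : Int) + 1 - 1)) = f (m : Int) := by
      simp
    rw [hcast, hsplit, List.foldl_append, ih, hs, he, hfirst]
    simp only [List.foldl_cons, List.foldl_nil, ← hpcdef]
    cases hf : f (m : Int) <;> cases hpc : pc <;>
      simp [PStep, hf, hpc, hlen (startsOf f (m : Int)), Prod.ext_iff,
        List.length_append, List.length_cons, List.length_nil] <;>
      push_cast <;>
      simp [hlen (startsOf f (m : Int))]

-- running sum of the first n entries of the diff array
def psum (d : List Int) (n : Nat) : Int :=
  ((List.range n).map (fun j => d.getD j 0)).sum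

lemma psum_succ (d : List Int) (n : Nat) : psum d (n + 1) = psum d n + d.getD n 0 := by
  simp [psum, List.range_succ]

lemma psum_set (d : List Int) (j : Nat) (v : Int) (n : Nat) :
    psum (d.set j v) n = psum d n + (if j < n ∧ j < d.length then v - d.getD j 0 else 0) := by
  induction n with
  | zero => simp [psum]
  | succ n ih =>
    rw [psum_succ, psum_succ, ih]
    have hget : (d.set j v).getD n 0 = if j = n ∧ j < d.length then v else d.getD n 0 := by
      simp only [List.getD_eq_getElem?_getD, List.getElem?_set]
      split_ifs with h1 h2 h3 h4 <;> simp_all <;> omega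
    rw [hget]
    split_ifs <;> simp_all <;> omega

lemma bStep_length (H : Int) (d : List Int) (box : List Int) :
    (bStep H d box).length = d.length := by
  simp only [bStep]
  split <;> simp [PySem.List.length_pySetD]

lemma psum_bStep (H : Int) (i : Nat) (hi : (i : Int) < H)
    (d : List Int) (hd : d.length = H.toNat + 1) (b : List Int) :
    psum (bStep H d b) (i + 1) = psum d (i + 1) +
      (if PySem.List.pyGetD b 0 0 ≤ (i : Int) ∧ (i : Int) ≤ PySem.List.pyGetD b 2 0 then 1 else 0) := by
  simp only [bStep]
  set b0 := PySem.List.pyGetD b 0 0 with hb0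
  set b2 := PySem.List.pyGetD b 2 0 with hb2
  set M := max b0 0 with hMdef
  set N := min b2 (H - 1) with hNdef
  have hM0 : (0 : Int) ≤ M := le_max_right _ _
  have hMb : b0 ≤ M := le_max_left _ _
  have hMc : M = b0 ∨ M = 0 := max_choice _ _
  have hNb : N ≤ b2 := min_le_left _ _
  have hNH : N ≤ H - 1 := min_le_right _ _
  have hNc : N = b2 ∨ N = H - 1 := min_choice _ _
  by_cases hcase : M ≤ N
  · have hN1 : (0 : Int) ≤ N + 1 := by omega
    rw [if_pos hcase, PySem.List.pyGetD_of_nonneg _ _ hM0, PySem.List.pySetD_of_nonneg _ _ hM0,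
      PySem.List.pyGetD_of_nonneg _ _ hN1, PySem.List.pySetD_of_nonneg _ _ hN1,
      psum_set, psum_set]
    simp only [List.length_set]
    split_ifs <;> rcases hMc with h1 | h1 <;> rcases hNc with h2 | h2 <;> omega
  · rw [if_neg hcase]
    have hnot : ¬ (b0 ≤ (i : Int) ∧ (i : Int) ≤ b2) := by
      rintro ⟨g1, g2⟩
      rcases hMc with h1 | h1 <;> rcases hNc with h2 | h2 <;> omega
    simp [hnot]

lemma psum_diff (arrayOfBoxes : List (List Int)) (H : Int) (i : Nat) (hi : (i : Int) < H)
    (d : List Int) (hd : d.length = H.toNat + 1) :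
    psum (arrayOfBoxes.foldl (bStep H) d) (i + 1) =
      psum d (i + 1) +
        (arrayOfBoxes.countP (fun b =>
          decide (PySem.List.pyGetD b 0 0 ≤ (i : Int)) && decide ((i : Int) ≤ PySem.List.pyGetD b 2 0)) : Int) := by
  induction arrayOfBoxes generalizing d with
  | nil => simp
  | cons b rest ih =>
    rw [List.foldl_cons, ih _ (by rw [bStep_length]; exact hd), psum_bStep H i hi d hd b,
      List.countP_cons]
    by_cases h : PySem.List.pyGetD b 0 0 ≤ (i : Int) ∧ (i : Int) ≤ PySem.List.pyGetD b 2 0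
    · have hbt : (decide (PySem.List.pyGetD b 0 0 ≤ (i : Int)) && decide ((i : Int) ≤ PySem.List.pyGetD b 2 0)) = true := by
        simp [h.1, h.2]
      rw [if_pos h, hbt]
      simp
      omega
    · have hbf : (decide (PySem.List.pyGetD b 0 0 ≤ (i : Int)) && decide ((i : Int) ≤ PySem.List.pyGetD b 2 0)) = false := by
        simp only [Bool.and_eq_false_iff, decide_eq_false_iff_not]
        tauto
      rw [if_neg h, hbf]
      simp

lemma psum_replicate_zero (n k : Nat) : psum (List.replicate n (0 : Int)) k = 0 := by
  apply List.sum_eq_zero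
  intro x hx
  obtain ⟨j, hj, rfl⟩ := List.mem_map.mp hx
  rcases lt_or_ge j n with h | h
  · simp [List.getD_replicate _ h]
  · rw [List.getD_eq_getElem?_getD, List.getElem?_eq_none (by simpa using h)]
    rfl

-- the per-line coverage booleans computed by B's scan
def gpred (diff : List Int) (i : Int) : Bool := decide (0 < psum diff (i.toNat + 1))

lemma foldl_bStep_length (H : Int) (boxes : List (List Int)) (d : List Int) :
    (boxes.foldl (bStep H) d).length = d.length := by
  induction boxes generalizing d with
  | nil => rfl
  | cons b rest ih => rw [List.foldl_cons, ih, bStep_length]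

-- characterisation of B's prefix-sum scan after the first n entries of diff
lemma scan_char (diff : List Int) (n : Nat) (hn : n ≤ diff.length) :
    (diff.take n).foldl scanStep ((0 : Int), false, (0 : Int), ([] : List Int), ([] : List Int)) =
      (psum diff n, (if n = 0 then false else decide (0 < psum diff n)), (n : Int),
       startsOf (gpred diff) n, endsOf (gpred diff) n) := by
  induction n with
  | zero => simp [PySem.List.pyRange_one_eq_nil, startsOf, endsOf, psum]
  | succ n ih =>
    have hn' : n < diff.length := by omega
    have htake : diff.take (n + 1) = diff.take n ++ [diff[n]] := by
      rw [List.take_succ, List.getElem?_eq_getElem hn']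
      rfl
    set f : Int → Bool := gpred diff with hfdef
    have hcast : ((n + 1 : Nat) : Int) = (n : Int) + 1 := by push_cast; ring
    have hsplit : PySem.List.pyRange 0 ((n : Int) + 1) 1
        = PySem.List.pyRange 0 (n : Int) 1 ++ [(n : Int)] :=
      PySem.List.pyRange_one_succ_right (by positivity)
    set pc : Bool := (if n = 0 then false else decide (0 < psum diff n)) with hpcdef
    have hgn : f (n : Int) = decide (0 < psum diff (n + 1)) := by
      simp [hfdef, gpred]
    have hgp : n ≠ 0 → f ((n : Int) - 1) = decide (0 < psum diff n) := by
      intro hnz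
      have h2 : ((n : Int) - 1).toNat + 1 = n := by omega
      simp only [hfdef, gpred]
      rw [h2]
    have hX : (((n : Int) == 0) || !f ((n : Int) - 1)) = !pc := by
      by_cases hm : n = 0
      · subst hm; simp [hpcdef]
      · have h0 : ((n : Int) == 0) = false := by simp; omega
        simp [hpcdef, hm, h0, hgp hm]
    have hY : ((!f (n : Int) && decide (0 < (n : Int))) && f ((n : Int) - 1)) = (!f (n : Int) && pc) := by
      by_cases hm : n = 0
      · subst hm; simp [hpcdef]
      · have h1 : decide ((0 : Int) < (n : Int)) = true := decide_eq_true (by omega)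
        rw [hpcdef, if_neg hm, h1, Bool.and_true, hgp hm]
    have hs : startsOf f ((n : Int) + 1)
        = startsOf f (n : Int) ++ (if f (n : Int) && !pc then [(n : Int)] else []) := by
      simp only [startsOf, hsplit, List.filter_append, List.filter_singleton, Bool.cond_eq_ite]
      rw [hX]
    have he : endsOf f ((n : Int) + 1)
        = endsOf f (n : Int) ++ (if !f (n : Int) && pc then [(n : Int)] else []) := by
      simp only [endsOf, hsplit, List.filter_append, List.filter_singleton, Bool.cond_eq_ite]
      rw [hY]
    have hpsucc : psum diff (n + 1) = psum diff n + diff[n] := by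
      rw [psum_succ, List.getD_eq_getElem?_getD, List.getElem?_eq_getElem hn']
      rfl
    rw [htake, List.foldl_append, ih (by omega), hcast, hs, he]
    simp only [List.foldl_cons, List.foldl_nil, scanStep, ← hpsucc, Nat.succ_ne_zero, if_neg,
      ← hgn]
    cases hf : f (n : Int) <;> cases hpc : pc <;>
      simp [hf, hpc, Prod.ext_iff] <;>
      simp [hgn]

-- ===== VERDICT (by name: the statement is the Claim_ definition above) =====
theorem GetLinesByBoundaryBoxes_spec : Claim_equal_GetLinesByBoundaryBoxes := by
  intro boxes H _ hpre
  unfold Spec_GetLinesByBoundaryBoxes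
  by_cases hH : H ≤ 0
  · simp [GetLinesByBoundaryBoxes, GetLinesByBoundaryBoxes_alt,
      PySem.List.pyRange_one_eq_nil hH, hH]
  · have hH' : 0 < H := by omega
    have h3 : ∀ box ∈ boxes, 3 ≤ box.length := by
      rcases hpre with h | h
      · omega
      · exact h
    have hm : ((H.toNat : Nat) : Int) = H := Int.toNat_of_nonneg (by omega)
    set f := covf boxes with hf
    -- A's side
    have hA : GetLinesByBoundaryBoxes boxes H
        = [PySem.List.pyRange 0 ((startsOf f H).length : Int) 1, startsOf f H, endsOf f H] := by
      unfold GetLinesByBoundaryBoxes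
      rw [afold_eq_pfold boxes _ h3]
      conv_lhs => rw [← hm, pfold_char f H.toNat]
      simp [hm]
    -- B's side
    set diff := boxes.foldl (bStep H) (List.replicate (H.toNat + 1) 0) with hdiff
    have hdlen : diff.length = H.toNat + 1 := by
      rw [hdiff, foldl_bStep_length]; simp
    have hcovval : ∀ i : Nat, (i : Int) < H → decide (0 < psum diff (i + 1)) = f i := by
      intro i hi
      rw [hdiff, psum_diff boxes H i hi _ (by simp), psum_replicate_zero]
      have hiff : (0 : Int) < 0 + (boxes.countP (fun b =>
            decide (PySem.List.pyGetD b 0 0 ≤ (i : Int)) && decide ((i : Int) ≤ PySem.List.pyGetD b 2 0)) : Int)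
          ↔ f i = true := by
        rw [zero_add, Int.natCast_pos, List.countP_pos_iff, hf, covf, List.any_eq_true]
      cases hfm : f (i : Int) <;> simp [hfm] at hiff ⊢ <;> [exact hiff; exact hiff]
    have hg : ∀ i : Int, 0 ≤ i → i < H → gpred diff i = f i := by
      intro i h0 hiH
      have h1 := hcovval i.toNat (by omega)
      rw [gpred, h1]
      congr 1
      omega
    have hslice : PySem.List.slice diff none (some H) = diff.take H.toNat :=
      PySem.List.slice_to _ (by omega)
    have hstarts : startsOf (gpred diff) H = startsOf f H := by
      rw [startsOf, startsOf]
      apply List.filter_congr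
      intro i hi
      obtain ⟨hi0, hiH⟩ := PySem.List.mem_pyRange_one.mp hi
      by_cases hz : i = 0
      · subst hz; simp [hg 0 le_rfl hiH]
      · have hz' : (i == 0) = false := by simp [hz]
        rw [hg i hi0 hiH, hg (i - 1) (by omega) (by omega), hz']
    have hends : endsOf (gpred diff) H = endsOf f H := by
      rw [endsOf, endsOf]
      apply List.filter_congr
      intro i hi
      obtain ⟨hi0, hiH⟩ := PySem.List.mem_pyRange_one.mp hi
      by_cases hz : i = 0
      · subst hz; simp
      · rw [hg i hi0 hiH, hg (i - 1) (by omega) (by omega)]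
    have hscan := scan_char diff H.toNat (by omega)
    rw [hA]
    simp only [GetLinesByBoundaryBoxes_alt, if_neg hH]
    rw [← hdiff, hslice, hscan]
    simp only [hm]
    rw [hstarts, hends]
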